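-- pv_equiv track=rewrite | github.com/MichaelAdamGroberman/gr0m_mem | gr0m_mem/store/sqlite_fts.py | _escape_fts_query
-- ===== SOURCE A (Python) =====
-- def _escape_fts_query(q: str) -> str:
--     """Escape a user query for FTS5 MATCH.
--
--     FTS5's MATCH syntax is its own small language (NEAR, OR, phrase
--     groups, column filters...). For a user's free-text question we want
--     simple AND-over-bag-of-words semantics, so we strip punctuation,
--     wrap each token in double-quotes to disable operators, and join with
--     spaces (implicit AND).
--     """
--     out: list[str] = []
--     current: list[str] = []
--     for ch in q:
--         if ch.isalnum() or ch == "_":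
--             current.append(ch.lower())
--         else:
--             if current:
--                 out.append("".join(current))
--                 current = []
--     if current:
--         out.append("".join(current))
--     # Drop very short fragments (FTS5 tokenizer would drop them anyway)
--     tokens = [t for t in out if len(t) > 1]
--     if not tokens:
--         return "\"\""  # never-matches fallback
--     # OR semantics so BM25 can rank partial matches instead of requiring
--     # every query token to hit. This is what users expect from natural-
--     # language questions, and BM25 handles the ranking for us.
--     return " OR ".join(f'"{t}"' for t in tokens)
-- ===== SOURCE B (Python) =====
-- def _escape_fts_query(q: str) -> str:
--     # Staged passes: normalize the whole string (lowercase word chars,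
--     # blank out everything else), then let str.split() extract the tokens.
--     normalized = "".join(ch.lower() if (ch.isalnum() or ch == "_") else " " for ch in q)
--     tokens = [t for t in normalized.split() if len(t) > 1]
--     if not tokens:
--         return '""'
--     return " OR ".join(f'"{t}"' for t in tokens)
-- ===== Notes on version B (the rewrite author's own statement) =====
-- stated objective: idiomatic
-- what changed: Replaces A's explicit out/current accumulator scan with two staged passes: a per-character normalization (lowercase word characters, map every other character to a space) followed by the library whitespace split; the length filter, fallback and OR-join are unchanged.
import Mathlib
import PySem

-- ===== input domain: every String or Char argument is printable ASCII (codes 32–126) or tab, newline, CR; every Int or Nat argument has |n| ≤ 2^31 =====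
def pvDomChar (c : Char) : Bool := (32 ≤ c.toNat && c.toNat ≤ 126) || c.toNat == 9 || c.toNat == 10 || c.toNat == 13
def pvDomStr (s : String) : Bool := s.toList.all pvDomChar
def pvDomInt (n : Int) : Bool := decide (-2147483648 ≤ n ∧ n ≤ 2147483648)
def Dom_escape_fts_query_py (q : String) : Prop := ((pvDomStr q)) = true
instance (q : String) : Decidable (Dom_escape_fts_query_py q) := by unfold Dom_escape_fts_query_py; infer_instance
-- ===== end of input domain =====

-- B replaces A's explicit out/current accumulator scan by two staged passes: normalize the
-- string (lowercase word chars, blank out the rest), then split on whitespace. Objective: idiomatic.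

-- ===== PORT A =====
-- ch.isalnum() (exact on the ASCII domain) or ch == '_'
def pvWordA (c : Char) : Bool := PySem.Chars.isalnum c || c == '_'

-- one iteration of A's for-loop; state = (out, current) as lists of chars
def pvStepA (s : List (List Char) × List Char) (ch : Char) : List (List Char) × List Char :=
  if pvWordA ch then (s.1, s.2 ++ [PySem.Chars.lowerChar ch])
  else if s.2.isEmpty then s
  else (s.1 ++ [s.2], [])

def escape_fts_query_py (q : String) : String :=
  let s := q.toList.foldl pvStepA ([], [])
  let out := if s.2.isEmpty then s.1 else s.1 ++ [s.2]
  let tokens := out.filter (fun t => t.length > 1)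
  if tokens.isEmpty then "\"\""
  else String.ofList (List.intercalate (" OR ".toList) (tokens.map (fun t => '"' :: (t ++ ['"']))))

-- ===== PORT B =====
-- normalization pass: lowercase a word character, map anything else to a space
def pvNorm (c : Char) : Char :=
  if PySem.Chars.isalnum c || c == '_' then PySem.Chars.lowerChar c else ' '

def escape_fts_query_py_alt (q : String) : String :=
  let normalized := q.toList.map pvNorm
  let tokens := (PySem.Chars.split₀ normalized).filter (fun t => t.length > 1)
  if tokens.isEmpty then "\"\""
  else String.ofList (PySem.Chars.join (" OR ".toList) (tokens.map (fun t => '"' :: (t ++ ['"']))))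

-- ===== PRECONDITION & SPEC =====
def Spec_escape_fts_query_py (q : String) (out : String) : Prop := out = escape_fts_query_py_alt q
instance (q : String) (out : String) : Decidable (Spec_escape_fts_query_py q out) := by unfold Spec_escape_fts_query_py; infer_instance

-- ===== CLAIM (what is proved, stated in full; the proofs are below) =====
def Claim_equal_escape_fts_query_py : Prop := ∀ (q : String), Dom_escape_fts_query_py q → Spec_escape_fts_query_py q (escape_fts_query_py q)

-- ===== LEMMAS AND PROOFS =====

-- A's loop with pending buffer `cur`, written as a recursion (reference form of A's fold)
def pvTokensAux (cur : List Char) : List Char → List (List Char)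
  | [] => if cur.isEmpty then [] else [cur]
  | c :: cs =>
    if pvWordA c then pvTokensAux (cur ++ [PySem.Chars.lowerChar c]) cs
    else if cur.isEmpty then pvTokensAux [] cs
    else cur :: pvTokensAux [] cs

theorem pvFold_eq_aux (cs : List Char) : ∀ (out : List (List Char)) (cur : List Char),
    (let s := cs.foldl pvStepA (out, cur);
     if s.2.isEmpty then s.1 else s.1 ++ [s.2]) = out ++ pvTokensAux cur cs := by
  induction cs with
  | nil =>
    intro out cur
    simp only [List.foldl_nil, pvTokensAux]
    by_cases h : cur.isEmpty <;> simp [h]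
  | cons c cs ih =>
    intro out cur
    simp only [List.foldl_cons, pvTokensAux, pvStepA]
    by_cases hw : pvWordA c
    · simpa [hw] using ih out (cur ++ [PySem.Chars.lowerChar c])
    · by_cases hc : cur.isEmpty
      · have hnil : cur = [] := by simpa using hc
        subst hnil
        simpa [hw] using ih out []
      · simpa [hw, hc, List.append_assoc] using ih (out ++ [cur]) []

-- char ≤ on code points
theorem pv_le_toNat {a b : Char} : a ≤ b ↔ a.toNat ≤ b.toNat := by
  rw [Char.le_def, UInt32.le_iff_toNat_le]
  rfl

theorem pv_word_bounds (c : Char) (h : pvWordA c = true) :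
    (65 ≤ c.toNat ∧ c.toNat ≤ 90) ∨ (97 ≤ c.toNat ∧ c.toNat ≤ 122) ∨
    (48 ≤ c.toNat ∧ c.toNat ≤ 57) ∨ c.toNat = 95 := by
  unfold pvWordA PySem.Chars.isalnum PySem.Chars.isalpha PySem.Chars.isdigit
    PySem.Chars.isupper PySem.Chars.islower at h
  simp only [Bool.or_eq_true, Bool.and_eq_true, decide_eq_true_eq, beq_iff_eq] at h
  rcases h with (((⟨h1, h2⟩ | ⟨h1, h2⟩) | ⟨h1, h2⟩) | h)
  · exact Or.inl ⟨pv_le_toNat.mp h1, pv_le_toNat.mp h2⟩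
  · exact Or.inr (Or.inl ⟨pv_le_toNat.mp h1, pv_le_toNat.mp h2⟩)
  · exact Or.inr (Or.inr (Or.inl ⟨pv_le_toNat.mp h1, pv_le_toNat.mp h2⟩))
  · subst h; exact Or.inr (Or.inr (Or.inr rfl))

theorem pv_not_space (d : Char) (h1 : 33 ≤ d.toNat) (h2 : d.toNat ≤ 126) :
    PySem.Chars.isspace d = false := by
  unfold PySem.Chars.isspace
  simp only [Bool.or_eq_false_iff, Bool.and_eq_false_iff, decide_eq_false_iff_not]
  omega

theorem pv_isspace_norm (c : Char) : PySem.Chars.isspace (pvNorm c) = !pvWordA c := by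
  unfold pvNorm
  have hword : (PySem.Chars.isalnum c || c == '_') = pvWordA c := rfl
  rw [hword]
  by_cases h : pvWordA c
  · rw [if_pos h, h, Bool.not_true]
    have hb := pv_word_bounds c h
    unfold PySem.Chars.lowerChar
    by_cases hu : PySem.Chars.isupper c
    · rw [if_pos hu]
      unfold PySem.Chars.isupper at hu
      simp only [Bool.and_eq_true, decide_eq_true_eq] at hu
      have h1 : 65 ≤ c.toNat := pv_le_toNat.mp hu.1
      have h2 : c.toNat ≤ 90 := pv_le_toNat.mp hu.2
      have hv : Nat.isValidChar (c.toNat + 32) := Or.inl (by omega)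
      apply pv_not_space <;> rw [Char.toNat_ofNat, if_pos hv] <;> omega
    · rw [if_neg hu]
      unfold PySem.Chars.isupper at hu
      simp only [Bool.and_eq_true, decide_eq_true_eq, not_and_or] at hu
      have hu' : ¬(65 ≤ c.toNat ∧ c.toNat ≤ 90) := by
        rcases hu with hu | hu
        · exact fun ⟨a, _⟩ => hu (pv_le_toNat.mpr a)
        · exact fun ⟨_, b⟩ => hu (pv_le_toNat.mpr b)
      apply pv_not_space <;> omega
  · have h' : pvWordA c = false := by simpa using h
    rw [if_neg (by simp [h']), h', Bool.not_false]
    decide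

-- B's whitespace split of the normalized string equals A's token recursion
theorem pv_go_eq (cs : List Char) : ∀ (cur : List Char) (acc : List (List Char)),
    PySem.Chars.split₀.go (cs.map pvNorm) cur acc = acc.reverse ++ pvTokensAux cur.reverse cs := by
  induction cs with
  | nil =>
    intro cur acc
    simp only [List.map_nil, PySem.Chars.split₀.go, pvTokensAux, List.isEmpty_reverse]
    by_cases h : cur.isEmpty <;> simp [h]
  | cons c cs ih =>
    intro cur acc
    simp only [List.map_cons, PySem.Chars.split₀.go, pv_isspace_norm]
    by_cases hw : pvWordA c
    · have hw' : (PySem.Chars.isalnum c || c == '_') = true := hw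
      have hn : pvNorm c = PySem.Chars.lowerChar c := by rw [pvNorm, if_pos hw']
      simp only [hw, Bool.not_true, if_neg (by simp : ¬(false = true)), ih, pvTokensAux,
        List.reverse_cons, hn]
      rfl
    · by_cases hc : cur.isEmpty
      · have hnil : cur = [] := by simpa using hc
        subst hnil
        simp [hw, ih, pvTokensAux]
      · simp [hw, hc, ih, pvTokensAux]

theorem pv_split_eq (cs : List Char) :
    PySem.Chars.split₀ (cs.map pvNorm) = pvTokensAux [] cs := by
  simpa using pv_go_eq cs [] []

-- ===== VERDICT (by name: the statement is the Claim_ definition above) =====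
theorem escape_fts_query_py_spec : Claim_equal_escape_fts_query_py := by
  intro q _
  unfold Spec_escape_fts_query_py escape_fts_query_py escape_fts_query_py_alt
  have h := pvFold_eq_aux q.toList [] []
  simp only [List.nil_append] at h
  simp only [h, pv_split_eq, PySem.Chars.join]
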